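-- pv_equiv track=rewrite | github.com/deprito/rantas | backend/app/services/report_generator.py | get_resolution_method
-- ===== SOURCE A (Python) =====
-- def get_resolution_method(history: list) -> str:
--     """Determine how the case was resolved based on history.
--
--     Args:
--         history: Case history entries
--
--     Returns:
--         Resolution method string
--     """
--     if not history:
--         return "unknown"
--
--     # Look for the last HTTP/DNS check that indicated resolution
--     for entry in reversed(history):
--         if isinstance(entry, dict):
--             entry_type = entry.get("type", "")
--             message = entry.get("message", "")
--
--             if entry_type == "http_check":
--                 return "http"
--             elif entry_type == "dns_check":
--                 return "dns"
--
--     # Check if emails were sent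
--     for entry in history:
--         if isinstance(entry, dict) and entry.get("type") == "email_sent":
--             return "email"
--
--     return "manual"
-- ===== SOURCE B (Python) =====
-- def get_resolution_method(history: list) -> str:
--     """Determine how the case was resolved based on history."""
--     if not history:
--         return "unknown"
--
--     last_check = None
--     has_email = False
--     for entry in history:
--         if isinstance(entry, dict):
--             t = entry.get("type", "")
--             if t == "http_check":
--                 last_check = "http"
--             elif t == "dns_check":
--                 last_check = "dns"
--             elif t == "email_sent":
--                 has_email = True
--
--     if last_check is not None:
--         return last_check
--     return "email" if has_email else "manual"
-- ===== Notes on version B (the rewrite author's own statement) =====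
-- stated objective: simpler
-- what changed: Replaces A's two full scans (a reverse scan for http/dns then a forward scan for email) with one forward pass keeping last_check and has_email accumulators.
import Mathlib
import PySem

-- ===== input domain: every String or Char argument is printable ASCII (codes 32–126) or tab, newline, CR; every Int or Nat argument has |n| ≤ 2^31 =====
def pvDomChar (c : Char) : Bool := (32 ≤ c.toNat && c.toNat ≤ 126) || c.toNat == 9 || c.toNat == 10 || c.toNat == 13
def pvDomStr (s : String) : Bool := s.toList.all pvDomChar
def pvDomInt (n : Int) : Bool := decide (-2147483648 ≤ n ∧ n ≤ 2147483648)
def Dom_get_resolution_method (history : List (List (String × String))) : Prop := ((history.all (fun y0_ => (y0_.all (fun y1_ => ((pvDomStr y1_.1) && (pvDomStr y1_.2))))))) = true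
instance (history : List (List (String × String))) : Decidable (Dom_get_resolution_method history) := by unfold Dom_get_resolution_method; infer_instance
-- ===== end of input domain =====

-- B replaces A's two full scans (reverse scan for http/dns, then forward scan for email)
-- with one forward pass keeping last_check / has_email accumulators (objective: simpler).


-- ===== PORT A =====
-- A's first loop: scan (already-reversed) list, return on the first http_check/dns_check.
def aCheckScan : List (List (String × String)) → Option String
  | [] => none
  | entry :: rest =>
      let entry_type := (PySem.Dict.mk entry).getD "type" ""
      let _message := (PySem.Dict.mk entry).getD "message" ""
      if entry_type = "http_check" then some "http"
      else if entry_type = "dns_check" then some "dns"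
      else aCheckScan rest

-- A's second loop: return "email" on the first entry with entry.get("type") == "email_sent".
def aEmailScan : List (List (String × String)) → Bool
  | [] => false
  | entry :: rest =>
      if (PySem.Dict.mk entry).get? "type" = some "email_sent" then true
      else aEmailScan rest

def get_resolution_method (history : List (List (String × String))) : String :=
  if history = [] then "unknown"
  else
    match aCheckScan history.reverse with
    | some s => s
    | none => if aEmailScan history then "email" else "manual"

-- ===== PORT B =====
-- one forward pass: state = (last_check, has_email)
def bStep (st : Option String × Bool) (entry : List (String × String)) : Option String × Bool :=
  let t := (PySem.Dict.mk entry).getD "type" ""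
  if t = "http_check" then (some "http", st.2)
  else if t = "dns_check" then (some "dns", st.2)
  else if t = "email_sent" then (st.1, true)
  else st

def get_resolution_method_alt (history : List (List (String × String))) : String :=
  if history = [] then "unknown"
  else
    let st := history.foldl bStep (none, false)
    match st.1 with
    | some s => s
    | none => if st.2 then "email" else "manual"

-- ===== PRECONDITION & SPEC =====
def Spec_get_resolution_method (history : List (List (String × String))) (out : String) : Prop := out = get_resolution_method_alt history
instance (history : List (List (String × String))) (out : String) : Decidable (Spec_get_resolution_method history out) := by unfold Spec_get_resolution_method; infer_instance

-- ===== CLAIM (what is proved, stated in full; the proofs are below) =====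
def Claim_equal_get_resolution_method : Prop := ∀ (history : List (List (String × String))), Dom_get_resolution_method history → Spec_get_resolution_method history (get_resolution_method history)

-- ===== LEMMAS AND PROOFS =====

theorem aCheckScan_append (xs ys : List (List (String × String))) :
    aCheckScan (xs ++ ys) =
      match aCheckScan xs with
      | some s => some s
      | none => aCheckScan ys := by
  induction xs with
  | nil => simp [aCheckScan]
  | cons e rest ih =>
      simp only [List.cons_append, aCheckScan]
      split_ifs <;> simp [ih]

theorem foldl_fst (l : List (List (String × String))) (st : Option String × Bool) :
    (l.foldl bStep st).1 =
      match aCheckScan l.reverse with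
      | some s => some s
      | none => st.1 := by
  induction l generalizing st with
  | nil => simp [aCheckScan]
  | cons e rest ih =>
      simp only [List.foldl_cons, List.reverse_cons, ih, aCheckScan_append]
      cases h : aCheckScan rest.reverse with
      | some s => simp
      | none =>
          simp only [aCheckScan, bStep]
          split_ifs <;> rfl

theorem foldl_snd (l : List (List (String × String))) (st : Option String × Bool) :
    (l.foldl bStep st).2 = (st.2 || aEmailScan l) := by
  induction l generalizing st with
  | nil => simp [aEmailScan]
  | cons e rest ih =>
      simp only [List.foldl_cons, ih, aEmailScan]
      have hgd : (PySem.Dict.mk e).getD "type" "" = ((PySem.Dict.mk e).get? "type").getD "" :=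
        PySem.Dict.getD_eq_get?_getD _ _ _
      cases h : (PySem.Dict.mk e).get? "type" with
      | none =>
          simp [bStep, hgd, h]
      | some v =>
          simp only [bStep, hgd, h, Option.getD_some]
          by_cases hv : v = "email_sent"
          · subst hv; simp
          · simp only [Option.some.injEq, hv]
            split_ifs <;> simp_all

-- ===== VERDICT (by name: the statement is the Claim_ definition above) =====
theorem get_resolution_method_spec : Claim_equal_get_resolution_method := by
  intro history _
  unfold Spec_get_resolution_method get_resolution_method get_resolution_method_alt
  by_cases h : history = []
  · simp [h]
  · simp only [if_neg h, foldl_fst, foldl_snd, Bool.false_or]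
    cases aCheckScan history.reverse <;> rfl
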